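-- pv_equiv track=rewrite | github.com/pypi-data/pypi-mirror-70 | packages/brocoli/brocoli-0.6.0.tar.gz/brocoli-0.6.0/brocoli/irodscatalog.py | splitsize
-- ===== SOURCE A (Python) =====
-- def splitsize(size, n, bs):
--     # generate a sequence of offsets and chunk size based on n (nb of threads)
--     # and bs (block size)
--
--     # number of blocks
--     nb = max(0, (size - 1) // bs) + 1
--
--     # ensure each thread has at least 2 chunks
--     n = max(1, min(n, nb//2))
--
--     d, m = divmod(nb, n)
--
--     p = 0
--     for i in range(m):
--         yield p*bs, (d + 1)*bs
--         p += d + 1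
--
--     for i in range(m, n):
--         yield p*bs, min(d*bs, size - p*bs)
--         p += d
-- ===== SOURCE B (Python) =====
-- def splitsize(size, n, bs):
--     # number of blocks
--     nb = max(0, (size - 1) // bs) + 1
--     # ensure each thread has at least 2 chunks
--     n = max(1, min(n, nb // 2))
--     d, m = divmod(nb, n)
--     for i in range(n):
--         # chunk i starts at block i*d + min(i, m): the first m chunks have d+1 blocks
--         start = (i * d + min(i, m)) * bs
--         if i < m:
--             yield start, (d + 1) * bs
--         else:
--             yield start, min(d * bs, size - start)
-- ===== Notes on version B (the rewrite author's own statement) =====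
-- stated objective: simpler
-- what changed: Replaced A's two sequential loops with a running offset accumulator by one loop over range(n) computing each chunk's start directly via the closed form i*d + min(i, m).
import Mathlib
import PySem

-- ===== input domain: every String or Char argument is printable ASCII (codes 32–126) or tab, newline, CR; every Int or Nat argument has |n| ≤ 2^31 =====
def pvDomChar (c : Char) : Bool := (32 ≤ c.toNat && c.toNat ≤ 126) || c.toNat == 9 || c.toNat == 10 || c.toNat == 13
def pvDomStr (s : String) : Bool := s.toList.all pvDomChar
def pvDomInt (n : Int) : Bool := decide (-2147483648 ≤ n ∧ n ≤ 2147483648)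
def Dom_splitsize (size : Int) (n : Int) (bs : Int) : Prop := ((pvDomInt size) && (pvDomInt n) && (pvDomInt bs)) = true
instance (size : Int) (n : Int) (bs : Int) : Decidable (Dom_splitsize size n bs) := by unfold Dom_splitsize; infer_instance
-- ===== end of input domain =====

-- B replaces A's two sequential loops with a running offset accumulator by one loop
-- over range(n) computing each chunk's start via the closed form i*d + min(i, m) (simpler).

-- ===== PORT A =====
def splitsize (size : Int) (n : Int) (bs : Int) : List (Int × Int) :=
  let nb := max 0 (PySem.Int.floordiv (size - 1) bs) + 1
  let n' := max 1 (min n (PySem.Int.floordiv nb 2))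
  let d := PySem.Int.floordiv nb n'
  let m := PySem.Int.mod nb n'
  let s1 := (PySem.List.pyRange 0 m 1).foldl
      (fun (s : List (Int × Int) × Int) _ =>
        (s.1 ++ [(s.2 * bs, (d + 1) * bs)], s.2 + (d + 1))) ([], 0)
  let s2 := (PySem.List.pyRange m n' 1).foldl
      (fun (s : List (Int × Int) × Int) _ =>
        (s.1 ++ [(s.2 * bs, min (d * bs) (size - s.2 * bs))], s.2 + d)) s1
  s2.1

-- ===== PORT B =====
def splitsize_alt (size : Int) (n : Int) (bs : Int) : List (Int × Int) :=
  let nb := max 0 (PySem.Int.floordiv (size - 1) bs) + 1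
  let n' := max 1 (min n (PySem.Int.floordiv nb 2))
  let d := PySem.Int.floordiv nb n'
  let m := PySem.Int.mod nb n'
  (PySem.List.pyRange 0 n' 1).map (fun i =>
    let start := (i * d + min i m) * bs
    if i < m then (start, (d + 1) * bs) else (start, min (d * bs) (size - start)))

-- ===== PRECONDITION & SPEC =====
-- bs = 0 makes '(size - 1) // bs' raise ZeroDivisionError in Python A.
def Pre_splitsize (size : Int) (n : Int) (bs : Int) : Prop := bs ≠ 0
instance (size : Int) (n : Int) (bs : Int) : Decidable (Pre_splitsize size n bs) := by unfold Pre_splitsize; infer_instance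
def pvWitness_splitsize : Int × Int × Int := (100, 3, 7)

def Spec_splitsize (size : Int) (n : Int) (bs : Int) (out : List (Int × Int)) : Prop := out = splitsize_alt size n bs
instance (size : Int) (n : Int) (bs : Int) (out : List (Int × Int)) : Decidable (Spec_splitsize size n bs out) := by unfold Spec_splitsize; infer_instance

-- ===== CLAIM (what is proved, stated in full; the proofs are below) =====
def Claim_equal_splitsize : Prop := ∀ (size : Int) (n : Int) (bs : Int), Dom_splitsize size n bs → Pre_splitsize size n bs → Spec_splitsize size n bs (splitsize size n bs)

-- ===== LEMMAS AND PROOFS =====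

-- A's first loop: starting from accumulator (acc, p0), k steps each emitting (p*bs, (d+1)*bs)
-- and advancing p by d+1.
theorem loop1_eq (bs d : Int) : ∀ (k : Nat) (p0 : Int) (acc : List (Int × Int)),
    (List.range k).foldl
      (fun (s : List (Int × Int) × Int) _ =>
        (s.1 ++ [(s.2 * bs, (d + 1) * bs)], s.2 + (d + 1))) (acc, p0)
    = (acc ++ (List.range k).map (fun (j : Nat) => ((p0 + (j : Int) * (d + 1)) * bs, (d + 1) * bs)),
       p0 + (k : Int) * (d + 1)) := by
  intro k
  induction k with
  | zero => simp
  | succ k ih =>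
    intro p0 acc
    rw [List.range_succ, List.foldl_append, ih, List.map_append]
    simp only [List.foldl_cons, List.foldl_nil, List.map_cons, List.map_nil,
      List.append_assoc]
    congr 1
    push_cast
    ring

-- A's second loop: k steps each emitting (p*bs, min(d*bs, size - p*bs)) and advancing p by d.
theorem loop2_eq (size bs d : Int) : ∀ (k : Nat) (p0 : Int) (acc : List (Int × Int)),
    (List.range k).foldl
      (fun (s : List (Int × Int) × Int) _ =>
        (s.1 ++ [(s.2 * bs, min (d * bs) (size - s.2 * bs))], s.2 + d)) (acc, p0)
    = (acc ++ (List.range k).map (fun (j : Nat) =>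
          ((p0 + (j : Int) * d) * bs, min (d * bs) (size - (p0 + (j : Int) * d) * bs))),
       p0 + (k : Int) * d) := by
  intro k
  induction k with
  | zero => simp
  | succ k ih =>
    intro p0 acc
    rw [List.range_succ, List.foldl_append, ih, List.map_append]
    simp only [List.foldl_cons, List.foldl_nil, List.map_cons, List.map_nil,
      List.append_assoc]
    congr 1
    push_cast
    ring

theorem splitsize_spec' (size n bs : Int) (hbs : bs ≠ 0) :
    splitsize size n bs = splitsize_alt size n bs := by
  unfold splitsize splitsize_alt
  set nb := max 0 (PySem.Int.floordiv (size - 1) bs) + 1 with hnb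
  set n' := max 1 (min n (PySem.Int.floordiv nb 2)) with hn'
  set d := PySem.Int.floordiv nb n' with hd
  set m := PySem.Int.mod nb n' with hm
  have hn'pos : (0 : Int) < n' := by rw [hn']; omega
  have hm0 : 0 ≤ m := PySem.Int.mod_nonneg nb hn'pos
  have hmn : m < n' := PySem.Int.mod_lt nb hn'pos
  simp only
  rw [PySem.List.pyRange_one_append 0 m n' hm0 (le_of_lt hmn), List.map_append,
      PySem.List.pyRange_one 0 m, PySem.List.pyRange_one m n']
  simp only [List.foldl_map, List.map_map]
  rw [loop1_eq bs d ((m - 0).toNat) 0 []]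
  rw [loop2_eq size bs d ((n' - m).toNat) (0 + ((m - 0).toNat : Int) * (d + 1)) _]
  have hmTo : (((m - 0).toNat : Int)) = m := by omega
  have hp0 : (0 : Int) + (((m - 0).toNat : Int)) * (d + 1) = m * (d + 1) := by rw [hmTo]; ring
  simp only [hp0, List.nil_append]
  congr 1
  · -- first segment: indices j < m
    apply List.map_congr_left
    intro j hj
    simp only [List.mem_range] at hj
    simp only [Function.comp_apply, ← hn', ← hd, ← hm]
    have hjm : (0 : Int) + (j : Int) < m := by omega
    have hmin : min ((0 : Int) + (j : Int)) m = (0 : Int) + (j : Int) := by omega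
    rw [if_pos hjm, hmin]
    ring_nf
  · -- second segment: indices m + j, j < n' - m
    apply List.map_congr_left
    intro j hj
    simp only [List.mem_range] at hj
    simp only [Function.comp_apply, ← hn', ← hd, ← hm]
    have hge : ¬ (m + (j : Int) < m) := by omega
    have hmin : min (m + (j : Int)) m = m := by omega
    rw [if_neg hge, hmin]
    have hp : m * (d + 1) + (j : Int) * d = (m + (j : Int)) * d + m := by ring
    rw [hp]

-- ===== VERDICT (by name: the statement is the Claim_ definition above) =====
theorem splitsize_spec : Claim_equal_splitsize := by
  intro size n bs _ hpre
  exact splitsize_spec' size n bs hpre
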